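-- pv_equiv track=rewrite | github.com/eunhee-dev/problem-solving | 0x0d_simulation/20056/solve.py | solve
-- ===== SOURCE A (Python) =====
-- from collections import defaultdict
--
-- DIRECTIONS = [(-1, 0), (-1, 1), (0, 1), (1, 1), (1, 0), (1, -1), (0, -1), (-1, -1)]
--
-- def solve(n: int, k: int, fireballs: list[list[int]]) -> int:
--     fireballs_dict = dict(enumerate(fireballs))
--     next_idx = len(fireballs)
--
--     for _ in range(k):
--         board = defaultdict(list)
--         for i in fireballs_dict:
--             r, c, _, s, d = fireballs_dict[i]
--             dr, dc = DIRECTIONS[d]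
--             nr, nc = (r + dr * s) % n, (c + dc * s) % n
--             board[(nr, nc)].append(i)
--             fireballs_dict[i][0] = nr
--             fireballs_dict[i][1] = nc
--
--         for (r, c), ball_idxs in board.items():
--             if len(ball_idxs) <= 1:
--                 continue
--             nm = sum(fireballs_dict[i][2] for i in ball_idxs) // 5
--             if nm != 0:
--                 ns = sum(fireballs_dict[i][3] for i in ball_idxs) // len(ball_idxs)
--                 d_parity = [fireballs_dict[i][4] % 2 for i in ball_idxs]
--                 if all(d_parity) or not any(d_parity):
--                     divided_balls = [[r, c, nm, ns, nd] for nd in range(0, 8, 2)]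
--                 else:
--                     divided_balls = [[r, c, nm, ns, nd] for nd in range(1, 8 ,2)]
--                 for i in range(4):
--                     fireballs_dict[next_idx + i] = divided_balls[i]
--                 next_idx += 4
--
--             for i in ball_idxs:
--                 del fireballs_dict[i]
--
--     return sum(fireball[2] for fireball in fireballs_dict.values())
-- ===== SOURCE B (Python) =====
-- DIRECTIONS = [(-1, 0), (-1, 1), (0, 1), (1, 1), (1, 0), (1, -1), (0, -1), (-1, -1)]
--
-- def solve(n: int, k: int, fireballs: list[list[int]]) -> int:
--     # Partition-refinement simulation without any dictionary: each step builds the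
--     # list of moved balls, then repeatedly extracts the whole group sharing the
--     # leading ball's cell, emitting its survivor or its split balls immediately.
--     # Does not mutate the caller's lists (return value only).
--     balls = fireballs
--     for _ in range(k):
--         moved = [[(r + DIRECTIONS[d][0] * s) % n, (c + DIRECTIONS[d][1] * s) % n, m, s, d]
--                  for r, c, m, s, d in balls]
--         nxt = []
--         while moved:
--             cell = (moved[0][0], moved[0][1])
--             grp = [b for b in moved if (b[0], b[1]) == cell]
--             moved = [b for b in moved if (b[0], b[1]) != cell]
--             if len(grp) == 1:
--                 nxt += grp
--             else:
--                 nm = sum(b[2] for b in grp) // 5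
--                 if nm != 0:
--                     ns = sum(b[3] for b in grp) // len(grp)
--                     if all(b[4] % 2 == grp[0][4] % 2 for b in grp):
--                         nxt += [[cell[0], cell[1], nm, ns, nd] for nd in range(0, 8, 2)]
--                     else:
--                         nxt += [[cell[0], cell[1], nm, ns, nd] for nd in range(1, 8, 2)]
--         balls = nxt
--     return sum(b[2] for b in balls)
-- ===== Notes on version B (the rewrite author's own statement) =====
-- stated objective: alternative
-- what changed: B replaces A's hash-grouping machinery (id-keyed dict, defaultdict board, next_idx counter, per-cell deletions) by partition refinement on a plain list: each step it repeatedly extracts the whole group sharing the leading ball's cell and emits that group's survivor or split balls immediately, with no dictionary at all.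
import Mathlib
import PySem

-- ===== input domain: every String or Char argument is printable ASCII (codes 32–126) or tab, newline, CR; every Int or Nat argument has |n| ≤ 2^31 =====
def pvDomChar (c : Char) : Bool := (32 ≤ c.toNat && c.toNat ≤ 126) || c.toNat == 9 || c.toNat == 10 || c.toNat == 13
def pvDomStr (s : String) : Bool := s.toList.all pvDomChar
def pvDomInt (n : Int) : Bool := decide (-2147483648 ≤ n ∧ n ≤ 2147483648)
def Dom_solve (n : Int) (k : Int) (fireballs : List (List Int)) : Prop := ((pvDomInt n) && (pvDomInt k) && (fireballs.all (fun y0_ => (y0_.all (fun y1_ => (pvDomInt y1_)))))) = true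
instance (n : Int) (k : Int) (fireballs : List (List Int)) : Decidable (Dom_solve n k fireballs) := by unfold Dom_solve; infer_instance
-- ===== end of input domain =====

-- B replaces A's dictionary simulation (id-keyed dict, defaultdict board, next_idx
-- counter, per-cell deletions) by partition refinement on a plain list: each step it
-- repeatedly extracts the whole group sharing the leading ball's cell and emits that
-- group's survivor or split balls immediately. A mutates the caller's inner lists'
-- coordinates, B does not: only the RETURN value is compared here.

-- ===== PORT A =====
def DIRECTIONS : List (Int × Int) := [(-1, 0), (-1, 1), (0, 1), (1, 1), (1, 0), (1, -1), (0, -1), (-1, -1)]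

-- body of A's first inner loop ('for i in fireballs_dict')
def stepA_move (n : Int)
    (acc : PySem.Dict Int (List Int) × PySem.Dict (Int × Int) (List Int)) (i : Int) :
    PySem.Dict Int (List Int) × PySem.Dict (Int × Int) (List Int) :=
  match acc.1.getD i [] with
  | [r, c, m, s, dd] =>
      let dir := (PySem.List.pyGet? DIRECTIONS dd).getD (0, 0)
      let nr := PySem.Int.mod (r + dir.1 * s) n
      let nc := PySem.Int.mod (c + dir.2 * s) n
      (acc.1.insert i [nr, nc, m, s, dd], acc.2.modify (nr, nc) [] (· ++ [i]))
  | _ => acc   -- unpacking a list of length ≠ 5 raises ValueError in Python; Pre_solve excludes it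

-- body of A's second inner loop ('for (r, c), ball_idxs in board.items()')
def stepA_merge (acc : PySem.Dict Int (List Int) × Int) (cell : (Int × Int) × List Int) :
    PySem.Dict Int (List Int) × Int :=
  if cell.2.length ≤ 1 then acc
  else
    let nm := PySem.Int.floordiv ((cell.2.map (fun i => PySem.List.pyGetD (acc.1.getD i []) 2 0)).sum) 5
    let acc2 :=
      if nm ≠ 0 then
        let ns := PySem.Int.floordiv ((cell.2.map (fun i => PySem.List.pyGetD (acc.1.getD i []) 3 0)).sum) (cell.2.length : Int)
        let dparity := cell.2.map (fun i => PySem.Int.mod (PySem.List.pyGetD (acc.1.getD i []) 4 0) 2)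
        let divided :=
          if dparity.all (fun x => x != 0) || !(dparity.any (fun x => x != 0)) then
            (PySem.List.pyRange 0 8 2).map (fun nd => [cell.1.1, cell.1.2, nm, ns, nd])
          else
            (PySem.List.pyRange 1 8 2).map (fun nd => [cell.1.1, cell.1.2, nm, ns, nd])
        ((PySem.List.pyRange 0 4 1).foldl
            (fun dd i => dd.insert (acc.2 + i) (PySem.List.pyGetD divided i [])) acc.1,
         acc.2 + 4)
      else acc
    (cell.2.foldl (fun dd i => dd.erase i) acc2.1, acc2.2)

-- one iteration of A's outer 'for _ in range(k)' loop; state = (fireballs_dict, next_idx)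
def solveStep (n : Int) (st : PySem.Dict Int (List Int) × Int) :
    PySem.Dict Int (List Int) × Int :=
  let p1 := st.1.keys.foldl (stepA_move n) (st.1, PySem.Dict.empty)
  p1.2.items.foldl stepA_merge (p1.1, st.2)

def solve (n : Int) (k : Int) (fireballs : List (List Int)) : Int :=
  let init : PySem.Dict Int (List Int) × Int :=
    (PySem.Dict.ofList (PySem.List.enumerate fireballs), PySem.List.len fireballs)
  let fin := (PySem.List.pyRange 0 k).foldl (fun st _ => solveStep n st) init
  (fin.1.values.map (fun fb => PySem.List.pyGetD fb 2 0)).sum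

-- ===== PORT B =====
-- the cell (b[0], b[1]) of a ball record
def cellOf (b : List Int) : Int × Int := (PySem.List.pyGetD b 0 0, PySem.List.pyGetD b 1 0)

-- the moved copy of a ball (B's move comprehension body)
def moveB (n : Int) (b : List Int) : List Int :=
  match b with
  | [r, c, m, s, d] =>
      let dir := (PySem.List.pyGet? DIRECTIONS d).getD (0, 0)
      [PySem.Int.mod (r + dir.1 * s) n, PySem.Int.mod (c + dir.2 * s) n, m, s, d]
  | _ => b   -- unpacking a list of length ≠ 5 raises ValueError in Python; Pre_solve excludes it

-- B's 'while moved:' partition-refinement loop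
def chop (moved : List (List Int)) : List (List Int) :=
  match moved with
  | [] => []
  | b :: rest =>
    let cell := cellOf b
    let grp := (b :: rest).filter (fun x => cellOf x == cell)
    let rest' := (b :: rest).filter (fun x => cellOf x != cell)
    (if grp.length == 1 then grp
     else
       let nm := PySem.Int.floordiv ((grp.map (fun x => PySem.List.pyGetD x 2 0)).sum) 5
       if nm ≠ 0 then
         let ns := PySem.Int.floordiv ((grp.map (fun x => PySem.List.pyGetD x 3 0)).sum) (grp.length : Int)
         if grp.all (fun x => PySem.Int.mod (PySem.List.pyGetD x 4 0) 2
               == PySem.Int.mod (PySem.List.pyGetD (PySem.List.pyGetD grp 0 []) 4 0) 2) then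
           (PySem.List.pyRange 0 8 2).map (fun nd => [cell.1, cell.2, nm, ns, nd])
         else
           (PySem.List.pyRange 1 8 2).map (fun nd => [cell.1, cell.2, nm, ns, nd])
       else []) ++ chop rest'
termination_by moved.length
decreasing_by
  have h : (List.filter (fun x => cellOf x != cellOf b) rest).length ≤ rest.length :=
    List.length_filter_le _ _
  simp
  omega

def solve_alt (n : Int) (k : Int) (fireballs : List (List Int)) : Int :=
  (((PySem.List.pyRange 0 k).foldl (fun bs _ => chop (bs.map (moveB n))) fireballs).map
      (fun b => PySem.List.pyGetD b 2 0)).sum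

-- ===== PRECONDITION & SPEC =====
-- Pre_solve admits exactly the inputs where the Python A returns: every ball needs
-- at least 3 components for the final mass sum, and as soon as a step runs (k ≥ 1)
-- every ball must unpack into exactly 5 components with a direction in [-8, 8)
-- (else ValueError/IndexError) and, if there is any ball to move, n ≠ 0 (else ZeroDivisionError).
def Pre_solve (n : Int) (k : Int) (fireballs : List (List Int)) : Prop :=
  (∀ fb ∈ fireballs, 3 ≤ fb.length) ∧
  (1 ≤ k → (fireballs ≠ [] → n ≠ 0) ∧
    ∀ fb ∈ fireballs, fb.length = 5 ∧
      -8 ≤ PySem.List.pyGetD fb 4 0 ∧ PySem.List.pyGetD fb 4 0 < 8)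
instance (n : Int) (k : Int) (fireballs : List (List Int)) : Decidable (Pre_solve n k fireballs) := by
  unfold Pre_solve; infer_instance

def pvWitness_solve : Int × Int × List (List Int) := (4, 2, [[0, 0, 5, 2, 3], [1, 1, 7, 1, 6]])

def Spec_solve (n : Int) (k : Int) (fireballs : List (List Int)) (out : Int) : Prop :=
  out = solve_alt n k fireballs
instance (n : Int) (k : Int) (fireballs : List (List Int)) (out : Int) : Decidable (Spec_solve n k fireballs out) := by
  unfold Spec_solve; infer_instance

-- ===== CLAIM (what is proved, stated in full; the proofs are below) =====
def Claim_equal_solve : Prop := ∀ (n : Int) (k : Int) (fireballs : List (List Int)),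
  Dom_solve n k fireballs → Pre_solve n k fireballs → Spec_solve n k fireballs (solve n k fireballs)

-- ===== LEMMAS AND PROOFS =====

-- ---------- basic helpers ----------

theorem ball5 {b : List Int} (h : b.length = 5) : ∃ r c m s dd, b = [r, c, m, s, dd] := by
  rcases b with _ | ⟨r, _ | ⟨c, _ | ⟨m, _ | ⟨s, _ | ⟨dd, _ | ⟨x, t⟩⟩⟩⟩⟩⟩ <;> simp_all

-- the cell a ball lands on
def cellK (n : Int) (b : List Int) : Int × Int :=
  (PySem.List.pyGetD (moveB n b) 0 0, PySem.List.pyGetD (moveB n b) 1 0)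

theorem length_move {b : List Int} (n : Int) (h : b.length = 5) : (moveB n b).length = 5 := by
  obtain ⟨r, c, m, s, dd, rfl⟩ := ball5 h; rfl

theorem stepA_move_eq (n : Int) (dA : PySem.Dict Int (List Int))
    (bd : PySem.Dict (Int × Int) (List Int)) (i : Int) (b : List Int)
    (hb : dA.getD i [] = b) (h5 : b.length = 5) :
    stepA_move n (dA, bd) i
      = (dA.insert i (moveB n b), bd.modify (cellK n b) [] (· ++ [i])) := by
  obtain ⟨r, c, m, s, dd, rfl⟩ := ball5 h5
  simp only [stepA_move, hb, moveB, cellK]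
  simp [PySem.List.pyGetD_ofNat']

-- the hash-grouped one-step function the proof factors both programs through
-- (the body of the OLD stepB helpers; proof-side only, used by neither port)
def stepB_move (n : Int)
    (acc : List (List Int) × PySem.Dict (Int × Int) (List (List Int))) (b : List Int) :
    List (List Int) × PySem.Dict (Int × Int) (List (List Int)) :=
  match b with
  | [r, c, m, s, dd] =>
      let dir := (PySem.List.pyGet? DIRECTIONS dd).getD (0, 0)
      let b' := [PySem.Int.mod (r + dir.1 * s) n, PySem.Int.mod (c + dir.2 * s) n, m, s, dd]
      (acc.1 ++ [b'], acc.2.modify (PySem.List.pyGetD b' 0 0, PySem.List.pyGetD b' 1 0) [] (· ++ [b']))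
  | _ => acc

-- A's output balls for one landing cell, A's parity formulation
def splitOut (c : Int × Int) (grp : List (List Int)) : List (List Int) :=
  if 1 < grp.length then
    if PySem.Int.floordiv ((grp.map (fun b => PySem.List.pyGetD b 2 0)).sum) 5 ≠ 0 then
      (PySem.List.pyRange
          (if (grp.map (fun b => PySem.Int.mod (PySem.List.pyGetD b 4 0) 2)).all (fun x => x != 0)
              || !((grp.map (fun b => PySem.Int.mod (PySem.List.pyGetD b 4 0) 2)).any (fun x => x != 0))
           then (0 : Int) else 1) 8 2).map
        (fun nd => [c.1, c.2, PySem.Int.floordiv ((grp.map (fun b => PySem.List.pyGetD b 2 0)).sum) 5,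
                    PySem.Int.floordiv ((grp.map (fun b => PySem.List.pyGetD b 3 0)).sum) (grp.length : Int), nd])
    else []
  else []

-- same thing, set-of-parities formulation
def splitOutB (c : Int × Int) (grp : List (List Int)) : List (List Int) :=
  if 1 < grp.length then
    if PySem.Int.floordiv ((grp.map (fun b => PySem.List.pyGetD b 2 0)).sum) 5 ≠ 0 then
      (PySem.List.pyRange
          (if (PySem.Set.ofList (grp.map (fun b => PySem.Int.mod (PySem.List.pyGetD b 4 0) 2))).length == 1
           then (0 : Int) else 1) 8 2).map
        (fun nd => [c.1, c.2, PySem.Int.floordiv ((grp.map (fun b => PySem.List.pyGetD b 2 0)).sum) 5,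
                    PySem.Int.floordiv ((grp.map (fun b => PySem.List.pyGetD b 3 0)).sum) (grp.length : Int), nd])
    else []
  else []

def stepB_split (acc : List (List Int)) (cell : (Int × Int) × List (List Int)) :
    List (List Int) :=
  if 1 < cell.2.length then
    let nm := PySem.Int.floordiv ((cell.2.map (fun b => PySem.List.pyGetD b 2 0)).sum) 5
    if nm ≠ 0 then acc ++ splitOutB cell.1 cell.2
    else acc
  else acc

def stepB (n : Int) (balls : List (List Int)) : List (List Int) :=
  let mg := balls.foldl (stepB_move n) ([], PySem.Dict.empty)
  let survivors := mg.1.filter (fun b =>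
    (mg.2.getD (PySem.List.pyGetD b 0 0, PySem.List.pyGetD b 1 0) []).length == 1)
  let splits := mg.2.items.foldl stepB_split []
  survivors ++ splits

theorem stepB_move_eq (n : Int) (acc : List (List Int))
    (bd : PySem.Dict (Int × Int) (List (List Int))) (b : List Int) (h5 : b.length = 5) :
    stepB_move n (acc, bd) b
      = (acc ++ [moveB n b], bd.modify (cellK n b) [] (· ++ [moveB n b])) := by
  obtain ⟨r, c, m, s, dd, rfl⟩ := ball5 h5
  simp only [stepB_move, moveB, cellK]

-- ---------- phase 1: the move loops ----------

theorem phase1A (n : Int) :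
    ∀ (ks : List Int) (d : PySem.Dict Int (List Int)) (bd : PySem.Dict (Int × Int) (List Int)),
    ks.Nodup → d.keys.Nodup →
    (∀ i ∈ ks, ∃ b, d.get? i = some b ∧ b.length = 5) →
    ks.foldl (stepA_move n) (d, bd)
      = (PySem.Dict.mk (d.items.map (fun p => if p.1 ∈ ks then (p.1, moveB n p.2) else p)),
         ks.foldl (fun bd2 i => bd2.modify (cellK n (d.getD i [])) [] (· ++ [i])) bd) := by
  intro ks
  induction ks with
  | nil =>
      intro d bd _ _ _
      simp
  | cons i t ih =>
      intro d bd hnd hdnd hex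
      obtain ⟨b, hget, h5⟩ := hex i (by simp)
      have hgetD : d.getD i [] = b := by rw [PySem.Dict.getD_eq_get?_getD, hget]; rfl
      have hcont : d.contains i = true := by rw [PySem.Dict.contains_eq_isSome_get?, hget]; rfl
      simp only [List.foldl_cons]
      rw [stepA_move_eq n d bd i b hgetD h5]
      have hkeys' : (d.insert i (moveB n b)).keys = d.keys := by
        exact PySem.Dict.keys_insert_of_contains d _ hcont
      have hnd' : (d.insert i (moveB n b)).keys.Nodup := by rw [hkeys']; exact hdnd
      have hti : i ∉ t := by simp at hnd; exact hnd.1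
      have hex' : ∀ j ∈ t, ∃ bb, (d.insert i (moveB n b)).get? j = some bb ∧ bb.length = 5 := by
        intro j hj
        obtain ⟨bb, hg, hl⟩ := hex j (by simp [hj])
        exact ⟨bb, by rw [PySem.Dict.get?_insert_of_ne d _ (by rintro rfl; exact hti hj), hg], hl⟩
      rw [ih (d.insert i (moveB n b)) _ (by simp at hnd; exact hnd.2) hnd' hex']
      refine congrArg₂ Prod.mk ?_ ?_
      · -- dict component
        congr 1
        rw [PySem.Dict.items_insert_of_contains d _ hcont]
        rw [List.map_map]
        apply List.map_congr_left
        intro p hp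
        by_cases hpi : p.1 = i
        · have hpb : p.2 = b := by
            have := PySem.Dict.get?_of_mem_items d hp hdnd
            rw [hpi] at this; rw [hget] at this; exact (Option.some.inj this).symm
          simp [Function.comp_def, hpi, beq_iff_eq, hpb, hti]
        · simp [Function.comp_def, hpi, beq_iff_eq, List.mem_cons]
      · -- board component
        rw [hgetD]
        apply PySem.List.foldl_congr_mem
        intro acc j hj
        have hj' : (d.insert i (moveB n b)).getD j [] = d.getD j [] := by
          rw [PySem.Dict.getD_eq_get?_getD, PySem.Dict.get?_insert_of_ne d _ (by rintro rfl; exact hti hj),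
              ← PySem.Dict.getD_eq_get?_getD]
        rw [hj']

theorem phase1B (n : Int) :
    ∀ (balls : List (List Int)) (acc0 : List (List Int))
      (bd0 : PySem.Dict (Int × Int) (List (List Int))),
    (∀ b ∈ balls, b.length = 5) →
    balls.foldl (stepB_move n) (acc0, bd0)
      = (acc0 ++ balls.map (moveB n),
         balls.foldl (fun bd b => bd.modify (cellK n b) [] (· ++ [moveB n b])) bd0) := by
  intro balls
  induction balls with
  | nil => intro acc0 bd0 _; simp
  | cons b t ih =>
      intro acc0 bd0 h5
      simp only [List.foldl_cons]
      rw [stepB_move_eq n acc0 bd0 b (h5 b (by simp))]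
      rw [ih _ _ (fun x hx => h5 x (by simp [hx]))]
      simp

-- ---------- the group-by board ----------

theorem board_getD {α κ ν : Type} [BEq κ] [LawfulBEq κ] (key : α → κ) (pay : α → ν) (l : List α) (c : κ) :
    (l.foldl (fun d x => d.modify (key x) [] (fun cur => cur ++ [pay x])) PySem.Dict.empty).getD c []
      = (l.filter (fun x => key x == c)).map pay := by
  have h1 : (l.map (fun x => (key x, pay x))).foldl
      (fun d p => d.modify p.1 [] (fun cur => cur ++ [p.2])) PySem.Dict.empty
      = l.foldl (fun d x => d.modify (key x) [] (fun cur => cur ++ [pay x])) PySem.Dict.empty := by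
    rw [List.foldl_map]
  rw [← h1, PySem.Dict.getD_foldl_modify_append]
  simp [List.filter_map, Function.comp_def]

theorem board_items {α κ ν : Type} [BEq κ] [LawfulBEq κ] (key : α → κ) (pay : α → ν) (l : List α) :
    (l.foldl (fun d x => d.modify (key x) [] (fun cur => cur ++ [pay x])) PySem.Dict.empty).items
      = (PySem.Set.ofList (l.map key)).map
          (fun c => (c, (l.filter (fun x => key x == c)).map pay)) := by
  have hnd : (l.foldl (fun d x => d.modify (key x) [] (fun cur => cur ++ [pay x])) PySem.Dict.empty).keys.Nodup := by
    exact PySem.Dict.nodup_keys_foldl_modify_key l key [] (fun d x cur => cur ++ [pay x]) _ (by simp)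
  have hk : (l.foldl (fun d x => d.modify (key x) [] (fun cur => cur ++ [pay x])) PySem.Dict.empty).keys
      = PySem.Set.ofList (l.map key) := by
    rw [PySem.Dict.keys_foldl_modify_key l key [] (fun d x cur => cur ++ [pay x])]
    simp [PySem.Set.ofList_eq_foldl, PySem.Set.update]
  rw [PySem.Dict.items_eq_map_keys _ hnd [], hk]
  exact List.map_congr_left (fun c _ => by rw [board_getD])

-- ---------- phase 2: the merge loop ----------

theorem foldl_erase_items {κ ν : Type} [BEq κ] [LawfulBEq κ] (idxs : List κ) :
    ∀ (d : PySem.Dict κ ν),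
    (idxs.foldl (fun dd i => dd.erase i) d).items
      = d.items.filter (fun p => !(idxs.contains p.1)) := by
  induction idxs with
  | nil => intro d; simp
  | cons i t ih =>
      intro d
      simp only [List.foldl_cons, ih]
      show (List.filter _ (d.erase i).items) = _
      simp only [PySem.Dict.erase, List.filter_filter]
      apply List.filter_congr
      intro p _
      cases h : p.1 == i <;> simp [h] <;> cases t.contains p.1 <;> simp

theorem length_splitOut (c : Int × Int) (grp : List (List Int)) :
    splitOut c grp = [] ∨ (splitOut c grp).length = 4 := by
  unfold splitOut
  by_cases h1 : 1 < grp.length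
  · simp only [if_pos h1]
    by_cases hnm : PySem.Int.floordiv ((grp.map (fun b => PySem.List.pyGetD b 2 0)).sum) 5 ≠ 0
    · simp only [if_pos hnm]
      right
      by_cases hp : ((grp.map (fun b => PySem.Int.mod (PySem.List.pyGetD b 4 0) 2)).all (fun x => x != 0)
          || !((grp.map (fun b => PySem.Int.mod (PySem.List.pyGetD b 4 0) 2)).any (fun x => x != 0))) = true
      · simp only [if_pos hp, List.length_map]; decide
      · simp only [if_neg hp, List.length_map]; decide
    · simp only [if_neg hnm]; left; simp
  · simp only [if_neg h1]; left; simp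

theorem parity_cond (l : List Int) (hne : l ≠ []) (h01 : ∀ x ∈ l, x = 0 ∨ x = 1) :
    (l.all (fun x => x != 0) || !(l.any (fun x => x != 0)))
      = ((PySem.Set.ofList l).length == 1) := by
  by_cases h0 : (0 : Int) ∈ l <;> by_cases h1 : (1 : Int) ∈ l
  · -- both: LHS false, RHS: length ≥ 2
    have hsub : [(0 : Int), 1].Subperm (PySem.Set.ofList l) := by
      apply List.subperm_of_subset (by decide)
      intro x hx
      rw [PySem.Set.mem_ofList]
      simp only [List.mem_cons, List.mem_singleton, List.not_mem_nil, or_false] at hx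
      rcases hx with rfl | rfl
      · exact h0
      · exact h1
    have hlen : 2 ≤ (PySem.Set.ofList l).length := hsub.length_le
    have hL : l.all (fun x => x != 0) = false := by
      by_cases hA : l.all (fun x => x != 0) = true
      · rw [List.all_eq_true] at hA
        have := hA 0 h0; simp at this
      · simpa using hA
    have hR : l.any (fun x => x != 0) = true := by
      rw [List.any_eq_true]; exact ⟨1, h1, by decide⟩
    rw [hL, hR]
    simp; omega
  · -- only 0s
    have hall : ∀ x ∈ l, x = 0 := by intro x hx; rcases h01 x hx with h | h; exact h; exact absurd (h ▸ hx) h1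
    have hset : PySem.Set.ofList l = [0] := by
      have hmem : ∀ x, x ∈ PySem.Set.ofList l ↔ x ∈ l := fun x => PySem.Set.mem_ofList l x
      have hnd := PySem.Set.nodup_ofList l
      have h0' : (0:Int) ∈ PySem.Set.ofList l := (hmem 0).2 h0
      have : ∀ x ∈ PySem.Set.ofList l, x = 0 := fun x hx => hall x ((hmem x).1 hx)
      rcases hq : PySem.Set.ofList l with _ | ⟨a, t⟩
      · rw [hq] at h0'; simp at h0'
      · rw [hq] at this hnd
        have ha := this a (by simp)
        subst ha
        have : t = [] := by
          rcases t with _ | ⟨b, t'⟩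
          · rfl
          · have hb := this b (by simp)
            simp [hb] at hnd
        simp [this]
    have hL : l.any (fun x => x != 0) = false := by
      simp [List.any_eq_true]; intro x hx; exact hall x hx
    rw [hL, hset]
    cases hA : l.all (fun x => x != 0) <;> simp
  · -- only 1s
    have hall : ∀ x ∈ l, x = 1 := by intro x hx; rcases h01 x hx with h | h; exact absurd (h ▸ hx) h0; exact h
    have hset : PySem.Set.ofList l = [1] := by
      have hmem : ∀ x, x ∈ PySem.Set.ofList l ↔ x ∈ l := fun x => PySem.Set.mem_ofList l x
      have hnd := PySem.Set.nodup_ofList l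
      have h1' : (1:Int) ∈ PySem.Set.ofList l := (hmem 1).2 h1
      have : ∀ x ∈ PySem.Set.ofList l, x = 1 := fun x hx => hall x ((hmem x).1 hx)
      rcases hq : PySem.Set.ofList l with _ | ⟨a, t⟩
      · rw [hq] at h1'; simp at h1'
      · rw [hq] at this hnd
        have ha := this a (by simp)
        subst ha
        have : t = [] := by
          rcases t with _ | ⟨b, t'⟩
          · rfl
          · have hb := this b (by simp)
            simp [hb] at hnd
        simp [this]
    have hL : l.all (fun x => x != 0) = true := by
      simp [List.all_eq_true]; intro x hx; rw [hall x hx]; decide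
    rw [hL, hset]
    simp
  · -- empty impossible
    rcases l with _ | ⟨a, t⟩
    · exact absurd rfl hne
    · rcases h01 a (by simp) with h | h
      · exact absurd (h ▸ List.mem_cons_self ..) h0
      · exact absurd (h ▸ List.mem_cons_self ..) h1

theorem splitOut_eq_splitOutB (c : Int × Int) (grp : List (List Int)) :
    splitOut c grp = splitOutB c grp := by
  unfold splitOut splitOutB
  by_cases hlen : 1 < grp.length
  · simp only [if_pos hlen]
    have hne : grp.map (fun b => PySem.Int.mod (PySem.List.pyGetD b 4 0) 2) ≠ [] := by
      simp; intro h; rw [h] at hlen; simp at hlen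
    have h01 : ∀ x ∈ grp.map (fun b => PySem.Int.mod (PySem.List.pyGetD b 4 0) 2), x = 0 ∨ x = 1 := by
      intro x hx
      simp at hx
      obtain ⟨b, _, rfl⟩ := hx
      have ha := PySem.Int.mod_nonneg (PySem.List.pyGetD b 4 0) (b := 2) (by norm_num)
      have hb := PySem.Int.mod_lt (PySem.List.pyGetD b 4 0) (b := 2) (by norm_num)
      omega
    rw [parity_cond _ hne h01]
  · simp only [if_neg hlen]

theorem stepB_split_eq (acc : List (List Int)) (cell : (Int × Int) × List (List Int)) :
    stepB_split acc cell = acc ++ splitOutB cell.1 cell.2 := by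
  simp only [stepB_split, splitOutB]
  split_ifs <;> simp

theorem stepB_split_flatMap (L : List ((Int × Int) × List (List Int))) :
    L.foldl stepB_split [] = L.flatMap (fun cell => splitOutB cell.1 cell.2) := by
  rw [PySem.List.foldl_congr_mem L stepB_split
      (fun acc cell => acc ++ splitOutB cell.1 cell.2) []
      (fun acc cell _ => stepB_split_eq acc cell),
    PySem.List.foldl_append_eq_flatMap]
  rfl

theorem stepA_merge_single (e : PySem.Dict Int (List Int)) (next : Int)
    (c : Int × Int) (idxs : List Int) (hle : idxs.length ≤ 1) :
    stepA_merge (e, next) (c, idxs) = (e, next) := by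
  simp [stepA_merge, hle]

theorem stepA_merge_multi (e : PySem.Dict Int (List Int)) (next : Int)
    (c : Int × Int) (idxs : List Int) (val : Int → List Int)
    (hv : ∀ i ∈ idxs, e.getD i [] = val i) (hgt : 1 < idxs.length)
    (hkeys : ∀ j ∈ e.keys, j < next) (hidx : ∀ i ∈ idxs, i < next) :
    stepA_merge (e, next) (c, idxs)
      = (PySem.Dict.mk ((e.items.filter (fun p => !(idxs.contains p.1)))
            ++ PySem.List.enumerate (splitOut c (idxs.map val)) next),
         next + if PySem.Int.floordiv (((idxs.map val).map (fun b => PySem.List.pyGetD b 2 0)).sum) 5 ≠ 0 then 4 else 0) := by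
  have hmap : ∀ (f : List Int → Int),
      idxs.map (fun i => f (e.getD i [])) = (idxs.map val).map f := by
    intro f
    rw [List.map_map]
    exact List.map_congr_left (fun i hi => by simp [hv i hi])
  simp only [stepA_merge, if_neg (by omega : ¬ idxs.length ≤ 1)]
  rw [hmap (fun b => PySem.List.pyGetD b 2 0), hmap (fun b => PySem.List.pyGetD b 3 0),
      hmap (fun b => PySem.Int.mod (PySem.List.pyGetD b 4 0) 2)]
  by_cases hnm : PySem.Int.floordiv (((idxs.map val).map (fun b => PySem.List.pyGetD b 2 0)).sum) 5 ≠ 0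
  · simp only [if_pos hnm]
    have hfresh : ∀ a ∈ PySem.List.pyRange 0 4 1, e.contains (next + a) = false := by
      intro a ha
      have := PySem.List.mem_pyRange_one.mp ha
      cases hc : e.contains (next + a)
      · rfl
      · exact absurd (hkeys _ ((PySem.Dict.contains_iff_mem_keys e _).mp hc)) (by omega)
    have hfnd : ((PySem.List.pyRange 0 4 1).map (fun a => next + a)).Nodup := by
      rw [show PySem.List.pyRange 0 4 1 = [0, 1, 2, 3] from by decide]
      simp
    have hsp : splitOut c (idxs.map val)
        = (if ((idxs.map val).map (fun b => PySem.Int.mod (PySem.List.pyGetD b 4 0) 2)).all (fun x => x != 0)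
              || !(((idxs.map val).map (fun b => PySem.Int.mod (PySem.List.pyGetD b 4 0) 2)).any (fun x => x != 0))
           then (PySem.List.pyRange 0 8 2).map
                  (fun nd => [c.1, c.2,
                    PySem.Int.floordiv (((idxs.map val).map (fun b => PySem.List.pyGetD b 2 0)).sum) 5,
                    PySem.Int.floordiv (((idxs.map val).map (fun b => PySem.List.pyGetD b 3 0)).sum) (idxs.length : Int), nd])
           else (PySem.List.pyRange 1 8 2).map
                  (fun nd => [c.1, c.2,
                    PySem.Int.floordiv (((idxs.map val).map (fun b => PySem.List.pyGetD b 2 0)).sum) 5,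
                    PySem.Int.floordiv (((idxs.map val).map (fun b => PySem.List.pyGetD b 3 0)).sum) (idxs.length : Int), nd])) := by
      unfold splitOut
      rw [if_pos (by simpa using hgt), if_pos hnm]
      simp only [List.length_map]
      by_cases hpar : (((idxs.map val).map (fun b => PySem.Int.mod (PySem.List.pyGetD b 4 0) 2)).all (fun x => x != 0)
              || !(((idxs.map val).map (fun b => PySem.Int.mod (PySem.List.pyGetD b 4 0) 2)).any (fun x => x != 0))) = true
      · rw [if_pos hpar, if_pos hpar]
      · rw [if_neg hpar, if_neg hpar]
    generalize hD : (if ((idxs.map val).map (fun b => PySem.Int.mod (PySem.List.pyGetD b 4 0) 2)).all (fun x => x != 0)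
              || !(((idxs.map val).map (fun b => PySem.Int.mod (PySem.List.pyGetD b 4 0) 2)).any (fun x => x != 0))
           then (PySem.List.pyRange 0 8 2).map
                  (fun nd => [c.1, c.2,
                    PySem.Int.floordiv (((idxs.map val).map (fun b => PySem.List.pyGetD b 2 0)).sum) 5,
                    PySem.Int.floordiv (((idxs.map val).map (fun b => PySem.List.pyGetD b 3 0)).sum) (idxs.length : Int), nd])
           else (PySem.List.pyRange 1 8 2).map
                  (fun nd => [c.1, c.2,
                    PySem.Int.floordiv (((idxs.map val).map (fun b => PySem.List.pyGetD b 2 0)).sum) 5,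
                    PySem.Int.floordiv (((idxs.map val).map (fun b => PySem.List.pyGetD b 3 0)).sum) (idxs.length : Int), nd])) = DIV at hsp ⊢
    have hlen : DIV.length = 4 := by
      rw [← hD]
      by_cases hpar : (((idxs.map val).map (fun b => PySem.Int.mod (PySem.List.pyGetD b 4 0) 2)).all (fun x => x != 0)
              || !(((idxs.map val).map (fun b => PySem.Int.mod (PySem.List.pyGetD b 4 0) 2)).any (fun x => x != 0))) = true
      · rw [if_pos hpar, List.length_map]; decide
      · rw [if_neg hpar, List.length_map]; decide
    refine congrArg₂ Prod.mk ?_ rfl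
    apply PySem.Dict.ext
    show _ = List.filter (fun p => !(idxs.contains p.1)) e.items ++ PySem.List.enumerate (splitOut c (List.map val idxs)) next
    rw [foldl_erase_items]
    rw [PySem.Dict.items_foldl_insert_fresh (PySem.List.pyRange 0 4 1) (fun a => next + a)
        (fun a => PySem.List.pyGetD DIV a []) e hfresh hfnd]
    rw [List.filter_append]
    have hnc : List.filter (fun p => !(idxs.contains p.1))
          ((PySem.List.pyRange 0 4 1).map (fun a => (next + a, PySem.List.pyGetD DIV a [])))
        = (PySem.List.pyRange 0 4 1).map (fun a => (next + a, PySem.List.pyGetD DIV a [])) := by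
      apply List.filter_eq_self.mpr
      intro p hp
      simp only [List.mem_map] at hp
      obtain ⟨a, ha, rfl⟩ := hp
      have ha' := PySem.List.mem_pyRange_one.mp ha
      cases hc : idxs.contains (next + a)
      · rfl
      · have : next + a ∈ idxs := by
          have := List.elem_iff.mp hc
          exact this
        exact absurd (hidx _ this) (by omega)
    rw [hnc, hsp]
    obtain ⟨x0, x1, x2, x3, hx⟩ : ∃ x0 x1 x2 x3, DIV = [x0, x1, x2, x3] := by
      rcases DIV with _ | ⟨x0, _ | ⟨x1, _ | ⟨x2, _ | ⟨x3, _ | ⟨y, t⟩⟩⟩⟩⟩ <;> simp_all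
    rw [hx, show PySem.List.pyRange 0 4 1 = [0, 1, 2, 3] from by decide]
    simp [PySem.List.enumerate, PySem.List.pyGetD_ofNat']
    omega
  · simp only [if_neg hnm]
    have hsp0 : splitOut c (idxs.map val) = [] := by
      unfold splitOut
      rw [if_pos (by simpa using hgt), if_neg hnm]
    refine congrArg₂ Prod.mk ?_ (by omega)
    apply PySem.Dict.ext
    show _ = List.filter (fun p => !(idxs.contains p.1)) e.items ++ PySem.List.enumerate (splitOut c (List.map val idxs)) next
    rw [foldl_erase_items, hsp0]
    simp [PySem.List.enumerate]

-- is i deleted at the end of A's merge loop over the cells cs?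
def delPred (ck : Int → Int × Int) (ks : List Int) (cs : List (Int × Int)) (i : Int) : Bool :=
  decide (i ∈ ks) && decide (ck i ∈ cs) &&
    decide (1 < (ks.filter (fun j => ck j == ck i)).length)

theorem nodup_pyRange (a b : Int) : (PySem.List.pyRange a b).Nodup := by
  unfold PySem.List.pyRange
  simp only [if_neg (by norm_num : ¬ (1:Int) = 0)]
  apply List.Nodup.map
  · intro x y hxy; simpa using hxy
  · exact List.nodup_range

theorem phase2A (ck : Int → Int × Int) (ks : List Int) (val : Int → List Int) :
    ∀ (cs : List (Int × Int)), cs.Nodup →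
    ∀ (e : PySem.Dict Int (List Int)) (next : Int),
    e.keys.Nodup → (∀ j ∈ e.keys, j < next) → (∀ j ∈ ks, j < next) →
    (∀ c ∈ cs, ∀ i ∈ ks, ck i = c → e.get? i = some (val i)) →
    (((cs.map (fun c => (c, ks.filter (fun i => ck i == c)))).foldl stepA_merge (e, next)).1.values
        = (e.items.filter (fun p => !(delPred ck ks cs p.1))).map (·.2)
          ++ cs.flatMap (fun c => splitOut c ((ks.filter (fun i => ck i == c)).map val)))
      ∧ ((cs.map (fun c => (c, ks.filter (fun i => ck i == c)))).foldl stepA_merge (e, next)).1.keys.Nodup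
      ∧ (∀ j ∈ ((cs.map (fun c => (c, ks.filter (fun i => ck i == c)))).foldl stepA_merge (e, next)).1.keys,
            j < ((cs.map (fun c => (c, ks.filter (fun i => ck i == c)))).foldl stepA_merge (e, next)).2)
      ∧ next ≤ ((cs.map (fun c => (c, ks.filter (fun i => ck i == c)))).foldl stepA_merge (e, next)).2 := by
  intro cs
  induction cs with
  | nil =>
      intro _ e next hend hbnd _ _
      refine ⟨?_, hend, hbnd, le_refl _⟩
      simp [delPred, PySem.Dict.values]
  | cons c cs' ih =>
      intro hnodup e next hend hbnd hksb hget
      have hcn : c ∉ cs' := (List.nodup_cons.mp hnodup).1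
      have hnd' : cs'.Nodup := (List.nodup_cons.mp hnodup).2
      simp only [List.map_cons, List.foldl_cons]
      by_cases hle : (ks.filter (fun i => ck i == c)).length ≤ 1
      · rw [stepA_merge_single e next c _ hle]
        obtain ⟨hval, hnd2, hb2, hnext2⟩ :=
          ih hnd' e next hend hbnd hksb
            (fun c' hc' i hi hcki => hget c' (by simp [hc']) i hi hcki)
        refine ⟨?_, hnd2, hb2, hnext2⟩
        rw [hval]
        have hsp0 : splitOut c ((ks.filter (fun i => ck i == c)).map val) = [] := by
          unfold splitOut
          rw [if_neg (by simpa using hle)]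
        rw [List.flatMap_cons, hsp0, List.nil_append]
        congr 2
        apply List.filter_congr
        intro p _
        have : delPred ck ks (c :: cs') p.1 = delPred ck ks cs' p.1 := by
          unfold delPred
          by_cases h1 : p.1 ∈ ks
          · by_cases hc2 : ck p.1 = c
            · have h3 : ¬ (1 < (ks.filter (fun j => ck j == ck p.1)).length) := by
                rw [hc2]; omega
              simp [h3]
            · simp [List.mem_cons, hc2]
          · simp [h1]
        rw [this]
      · rw [not_le] at hle
        have hvv : ∀ i ∈ ks.filter (fun i => ck i == c), e.getD i [] = val i := by
          intro i hi
          have hmem := List.mem_of_mem_filter hi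
          have hck : ck i = c := by simpa using List.of_mem_filter hi
          rw [PySem.Dict.getD_eq_get?_getD, hget c (by simp) i hmem hck]
          rfl
        have hib : ∀ i ∈ ks.filter (fun i => ck i == c), i < next :=
          fun i hi => hksb i (List.mem_of_mem_filter hi)
        rw [stepA_merge_multi e next c _ val hvv hle hbnd hib]
        -- the dictionary after this cell
        set spl := splitOut c ((ks.filter (fun i => ck i == c)).map val) with hspl
        set nm := PySem.Int.floordiv ((((ks.filter (fun i => ck i == c)).map val).map
            (fun b => PySem.List.pyGetD b 2 0)).sum) 5 with hnm
        set next₂ := next + (if nm ≠ 0 then 4 else 0) with hnext₂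
        set e₂ : PySem.Dict Int (List Int) := PySem.Dict.mk
            ((e.items.filter (fun p => !((ks.filter (fun i => ck i == c)).contains p.1)))
              ++ PySem.List.enumerate spl next) with he₂
        have hsplen : spl = [] ∨ spl.length = 4 := length_splitOut c _
        have hspnm : nm = 0 → spl = [] := by
          intro h0
          rw [hspl]; unfold splitOut
          rw [if_pos (by simpa using hle), if_neg (by rw [← hnm]; simpa using h0)]
        have hnle : next ≤ next₂ := by rw [hnext₂]; split_ifs <;> omega
        have hkeys₂ : e₂.keys
            = (e.items.filter (fun p => !((ks.filter (fun i => ck i == c)).contains p.1))).map (·.1)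
              ++ PySem.List.pyRange next (next + spl.length) := by
          show ((e.items.filter _) ++ PySem.List.enumerate spl next).map (·.1) = _
          rw [List.map_append, PySem.List.map_fst_enumerate]
        have hleftkeys : ∀ j ∈ (e.items.filter (fun p => !((ks.filter (fun i => ck i == c)).contains p.1))).map
            (fun p => p.1), j < next := by
          intro j hj
          obtain ⟨p, hp, rfl⟩ := List.mem_map.mp hj
          exact hbnd _ (List.mem_map_of_mem (List.mem_of_mem_filter hp))
        have hnd₂ : e₂.keys.Nodup := by
          rw [hkeys₂]
          apply List.Nodup.append
          · have hsubl : ((e.items.filter (fun p => !((ks.filter (fun i => ck i == c)).contains p.1))).map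
                  (fun p => p.1)).Sublist (e.items.map (fun p => p.1)) :=
              List.Sublist.map (fun p : Int × List Int => p.1)
                (List.filter_sublist (p := fun p => !((ks.filter (fun i => ck i == c)).contains p.1)) (l := e.items))
            exact hsubl.nodup hend
          · exact nodup_pyRange _ _
          · intro j hj1 hj2
            have h1 := hleftkeys j hj1
            have h2 := (PySem.List.mem_pyRange_one.mp hj2).1
            omega
        have hbnd₂ : ∀ j ∈ e₂.keys, j < next₂ := by
          intro j hj
          rw [hkeys₂] at hj
          rcases List.mem_append.mp hj with hj | hj
          · exact lt_of_lt_of_le (hleftkeys j hj) hnle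
          · have h2 := PySem.List.mem_pyRange_one.mp hj
            rcases hsplen with h | h
            · rw [h] at h2; simp at h2; omega
            · have : nm ≠ 0 := by
                intro h0
                rw [hspnm h0] at h; simp at h
              rw [hnext₂, if_pos this]
              omega
        have hksb₂ : ∀ j ∈ ks, j < next₂ := fun j hj => lt_of_lt_of_le (hksb j hj) hnle
        have hget₂ : ∀ c' ∈ cs', ∀ i ∈ ks, ck i = c' → e₂.get? i = some (val i) := by
          intro c' hc' i hi hcki
          have hne : ck i ≠ c := by rw [hcki]; rintro rfl; exact hcn hc'
          have hnotg : i ∉ ks.filter (fun j => ck j == c) := by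
            intro hmem
            exact hne (by simpa using List.of_mem_filter hmem)
          have hmm : (i, val i) ∈ e₂.items := by
            show (i, val i) ∈ (e.items.filter _) ++ _
            apply List.mem_append_left
            apply List.mem_filter.mpr
            refine ⟨PySem.Dict.mem_items_of_get?_eq_some e (hget c' (by simp [hc']) i hi hcki), ?_⟩
            simp only [Bool.not_eq_eq_eq_not, Bool.not_true]
            cases hcont : (ks.filter (fun j => ck j == c)).contains i
            · rfl
            · exact absurd (List.elem_iff.mp hcont) hnotg
          exact PySem.Dict.get?_of_mem_items e₂ hmm hnd₂
        obtain ⟨hval, hnd3, hb3, hnext3⟩ := ih hnd' e₂ next₂ hnd₂ hbnd₂ hksb₂ hget₂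
        refine ⟨?_, hnd3, hb3, le_trans hnle hnext3⟩
        rw [hval]
        have hitems₂ : e₂.items
            = (e.items.filter (fun p => !((ks.filter (fun i => ck i == c)).contains p.1)))
              ++ PySem.List.enumerate spl next := rfl
        rw [hitems₂, List.filter_append, List.filter_filter]
        have hnewskeep : (PySem.List.enumerate spl next).filter
              (fun p => !(delPred ck ks cs' p.1))
            = PySem.List.enumerate spl next := by
          apply List.filter_eq_self.mpr
          intro p hp
          have hp1 : p.1 ∈ PySem.List.pyRange next (next + spl.length) := by
            rw [← PySem.List.map_fst_enumerate spl next]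
            exact List.mem_map_of_mem hp
          have hge := (PySem.List.mem_pyRange_one.mp hp1).1
          have hnks : p.1 ∉ ks := by
            intro hmem
            exact absurd (hksb p.1 hmem) (by omega)
          unfold delPred
          simp [hnks]
        rw [hnewskeep]
        have hfiltc : e.items.filter
              (fun p => !(delPred ck ks cs' p.1) && !((ks.filter (fun i => ck i == c)).contains p.1))
            = e.items.filter (fun p => !(delPred ck ks (c :: cs') p.1)) := by
          apply List.filter_congr
          intro p _
          by_cases hmem : p.1 ∈ ks.filter (fun j => ck j == c)
          · have hcont : (ks.filter (fun j => ck j == c)).contains p.1 = true :=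
              List.elem_iff.mpr hmem
            have hks : p.1 ∈ ks := List.mem_of_mem_filter hmem
            have hck : ck p.1 = c := by simpa using List.of_mem_filter hmem
            have hdel : delPred ck ks (c :: cs') p.1 = true := by
              unfold delPred
              rw [hck]
              simp [hks, List.mem_cons, hle]
            rw [hcont, hdel]
            simp
          · have hcont : (ks.filter (fun j => ck j == c)).contains p.1 = false := by
              cases hcont : (ks.filter (fun j => ck j == c)).contains p.1
              · rfl
              · exact absurd (List.elem_iff.mp hcont) hmem
            have hdel : delPred ck ks (c :: cs') p.1 = delPred ck ks cs' p.1 := by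
              unfold delPred
              by_cases hks : p.1 ∈ ks
              · by_cases hck : ck p.1 = c
                · exact absurd (List.mem_filter.mpr ⟨hks, by simp [hck]⟩) hmem
                · simp [List.mem_cons, hck]
              · simp [hks]
            rw [hcont, hdel]
            simp
        rw [hfiltc]
        rw [List.map_append, PySem.List.map_snd_enumerate]
        rw [List.flatMap_cons, ← hspl]
        rw [List.append_assoc]

-- ---------- one whole step of A equals the hash-grouped helper ----------

theorem step_main (n : Int) (d : PySem.Dict Int (List Int)) (next : Int)
    (hnd : d.keys.Nodup) (hlt : ∀ i ∈ d.keys, i < next)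
    (h5 : ∀ b ∈ d.values, b.length = 5) :
    (solveStep n (d, next)).1.values = stepB n d.values ∧
    (solveStep n (d, next)).1.keys.Nodup ∧
    (∀ i ∈ (solveStep n (d, next)).1.keys, i < (solveStep n (d, next)).2) := by
  have hex : ∀ i ∈ d.keys, ∃ b, d.get? i = some b ∧ b.length = 5 := by
    intro i hi
    cases hq : d.get? i with
    | none => exact absurd hi ((PySem.Dict.get?_eq_none_iff_not_mem_keys d i).mp hq)
    | some b =>
        refine ⟨b, rfl, h5 b ?_⟩
        exact List.mem_map_of_mem (PySem.Dict.mem_items_of_get?_eq_some d hq)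
  have hp1 := phase1A n d.keys d PySem.Dict.empty hnd hnd hex
  -- the dictionary after the move loop
  have hd1items : (PySem.Dict.mk (d.items.map (fun p => if p.1 ∈ d.keys then (p.1, moveB n p.2) else p))).items
      = d.items.map (fun p => (p.1, moveB n p.2)) := by
    show List.map _ _ = _
    exact List.map_congr_left (fun p hp => if_pos (PySem.Dict.mem_keys_of_mem_items d hp))
  set d1 := PySem.Dict.mk (d.items.map (fun p => if p.1 ∈ d.keys then (p.1, moveB n p.2) else p)) with hd1
  have hd1keys : d1.keys = d.keys := by
    show (d1.items.map (fun p => p.1)) = d.items.map (fun p => p.1)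
    rw [hd1items, List.map_map]
    rfl
  have hd1vals : d1.values = d.values.map (moveB n) := by
    show (d1.items.map (fun p => p.2)) = (d.items.map (fun p => p.2)).map (moveB n)
    rw [hd1items, List.map_map, List.map_map]
    rfl
  have hd1get : ∀ i ∈ d.keys, d1.get? i = some (moveB n (d.getD i [])) := by
    intro i hi
    obtain ⟨b, hb, _⟩ := hex i hi
    have hgd : d.getD i [] = b := by rw [PySem.Dict.getD_eq_get?_getD, hb]; rfl
    apply PySem.Dict.get?_of_mem_items d1 _ (hd1keys ▸ hnd)
    rw [hd1items, hgd]
    exact List.mem_map.mpr ⟨(i, b), PySem.Dict.mem_items_of_get?_eq_some d hb, rfl⟩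
  have hvals : d.values = d.keys.map (fun i => d.getD i []) := PySem.Dict.values_eq_map_keys d hnd []
  -- the board of A, grouped
  have hboardA : (d.keys.foldl (fun bd2 i => bd2.modify (cellK n (d.getD i [])) [] (· ++ [i])) PySem.Dict.empty).items
      = (PySem.Set.ofList (d.keys.map (fun i => cellK n (d.getD i [])))).map
          (fun c => (c, d.keys.filter (fun i => cellK n (d.getD i []) == c))) := by
    rw [board_items (fun i => cellK n (d.getD i [])) (fun i => i) d.keys]
    simp
  obtain ⟨hval, hnd3, hb3, _⟩ :=
    phase2A (fun i => cellK n (d.getD i [])) d.keys (fun i => moveB n (d.getD i []))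
      (PySem.Set.ofList (d.keys.map (fun i => cellK n (d.getD i [])))) (PySem.Set.nodup_ofList _)
      d1 next (hd1keys ▸ hnd) (fun j hj => hlt j (hd1keys ▸ hj)) hlt
      (fun _ _ i hi _ => hd1get i hi)
  have hfold : solveStep n (d, next)
      = ((PySem.Set.ofList (d.keys.map (fun i => cellK n (d.getD i [])))).map
          (fun c => (c, d.keys.filter (fun i => cellK n (d.getD i []) == c)))).foldl
            stepA_merge (d1, next) := by
    show ((d.keys.foldl (stepA_move n) (d, PySem.Dict.empty)).2.items).foldl stepA_merge
        ((d.keys.foldl (stepA_move n) (d, PySem.Dict.empty)).1, next) = _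
    rw [hp1]
    rw [hboardA]
  refine ⟨?_, by rw [hfold]; exact hnd3, by rw [hfold]; exact hb3⟩
  rw [hfold, hval]
  -- now the hash-grouped side
  show _ = stepB n d.values
  have hmg := phase1B n d.values [] PySem.Dict.empty h5
  have hmoved : (d.values.foldl (stepB_move n) ([], PySem.Dict.empty)).1 = d.values.map (moveB n) := by
    rw [hmg]
    simp
  have hboardB : ∀ cc, (d.values.foldl (stepB_move n) ([], PySem.Dict.empty)).2.getD cc []
      = (d.values.filter (fun b => cellK n b == cc)).map (moveB n) := by
    intro cc
    rw [hmg]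
    exact board_getD (cellK n) (moveB n) d.values cc
  have hboardBitems : (d.values.foldl (stepB_move n) ([], PySem.Dict.empty)).2.items
      = (PySem.Set.ofList (d.values.map (cellK n))).map
          (fun c => (c, (d.values.filter (fun b => cellK n b == c)).map (moveB n))) := by
    rw [hmg]
    exact board_items (cellK n) (moveB n) d.values
  have hkeyeq : d.values.map (cellK n) = d.keys.map (fun i => cellK n (d.getD i [])) := by
    rw [hvals, List.map_map]
    rfl
  have hgrp : ∀ c, (d.values.filter (fun b => cellK n b == c)).map (moveB n)
      = (d.keys.filter (fun i => cellK n (d.getD i []) == c)).map (fun i => moveB n (d.getD i [])) := by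
    intro c
    rw [hvals, List.filter_map, List.map_map]
    rfl
  simp only [stepB]
  rw [hmoved, hboardBitems]
  -- survivors
  have hsurv : ((d.values.map (moveB n)).filter (fun b =>
        ((d.values.foldl (stepB_move n) ([], PySem.Dict.empty)).2.getD
          (PySem.List.pyGetD b 0 0, PySem.List.pyGetD b 1 0) []).length == 1) : List (List Int))
      = (d1.items.filter (fun p => !(delPred (fun i => cellK n (d.getD i [])) d.keys
            (PySem.Set.ofList (d.keys.map (fun i => cellK n (d.getD i [])))) p.1))).map (fun p => p.2) := by
    have hL : d.values.map (moveB n) = d1.items.map (fun p => p.2) := by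
      show (d.items.map (fun p => p.2)).map (moveB n) = _
      rw [hd1items, List.map_map, List.map_map]
      rfl
    rw [hL, List.filter_map]
    apply congrArg (List.map (fun p : Int × List Int => p.2))
    apply List.filter_congr
    intro p hp
    rw [hd1items] at hp
    obtain ⟨p₀, hp₀, rfl⟩ := List.mem_map.mp hp
    have hks : p₀.1 ∈ d.keys := PySem.Dict.mem_keys_of_mem_items d hp₀
    have hgd : d.getD p₀.1 [] = p₀.2 := PySem.Dict.getD_of_mem_items d hp₀ hnd []
    have hcell : (PySem.List.pyGetD (moveB n p₀.2) 0 0, PySem.List.pyGetD (moveB n p₀.2) 1 0)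
        = cellK n (d.getD p₀.1 []) := by rw [hgd]; rfl
    have hlen1 : 1 ≤ (d.keys.filter (fun i => cellK n (d.getD i [])
        == cellK n (d.getD p₀.1 []))).length := by
      have : p₀.1 ∈ d.keys.filter (fun i => cellK n (d.getD i []) == cellK n (d.getD p₀.1 [])) :=
        List.mem_filter.mpr ⟨hks, by simp⟩
      exact List.length_pos_of_mem this
    show ((((d.values.foldl (stepB_move n) ([], PySem.Dict.empty)).2.getD
        (PySem.List.pyGetD (moveB n p₀.2) 0 0, PySem.List.pyGetD (moveB n p₀.2) 1 0) []).length == 1) : Bool)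
      = !(delPred (fun i => cellK n (d.getD i [])) d.keys
            (PySem.Set.ofList (d.keys.map (fun i => cellK n (d.getD i [])))) p₀.1)
    rw [hcell, hboardB, hgrp, List.length_map]
    have hmemcs : cellK n (d.getD p₀.1 [])
        ∈ PySem.Set.ofList (d.keys.map (fun i => cellK n (d.getD i []))) := by
      rw [PySem.Set.mem_ofList]
      exact List.mem_map_of_mem hks
    unfold delPred
    simp only [hks, hmemcs, decide_true, Bool.true_and]
    by_cases hgt : 1 < (d.keys.filter (fun i => cellK n (d.getD i [])
        == cellK n (d.getD p₀.1 []))).length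
    · rw [decide_eq_true hgt]
      simp only [Bool.not_true]
      exact beq_eq_false_iff_ne.mpr (by omega)
    · rw [decide_eq_false hgt]
      simp only [Bool.not_false]
      exact beq_iff_eq.mpr (by omega)
  rw [hsurv]
  -- splits
  congr 1
  rw [stepB_split_flatMap, hkeyeq]
  rw [List.flatMap_map]
  apply List.flatMap_congr
  intro c _
  show splitOut c ((d.keys.filter (fun i => cellK n (d.getD i []) == c)).map (fun i => moveB n (d.getD i [])))
      = splitOutB c ((d.values.filter (fun b => cellK n b == c)).map (moveB n))
  rw [hgrp c]
  exact splitOut_eq_splitOutB c _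

theorem stepB_len5 (n : Int) (balls : List (List Int)) (h5 : ∀ b ∈ balls, b.length = 5) :
    ∀ b ∈ stepB n balls, b.length = 5 := by
  intro b hb
  simp only [stepB] at hb
  rcases List.mem_append.mp hb with hb | hb
  · have hb' := List.mem_of_mem_filter hb
    rw [phase1B n balls [] PySem.Dict.empty h5] at hb'
    simp only [List.nil_append] at hb'
    obtain ⟨x, hx, rfl⟩ := List.mem_map.mp hb'
    exact length_move n (h5 x hx)
  · rw [stepB_split_flatMap] at hb
    obtain ⟨cell, _, hmem⟩ := List.mem_flatMap.mp hb
    unfold splitOutB at hmem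
    split_ifs at hmem
    all_goals first
      | (obtain ⟨nd, _, rfl⟩ := List.mem_map.mp hmem; rfl)
      | exact absurd hmem List.not_mem_nil

-- ---------- the outer loop of A ----------

theorem loop_eq (n : Int) (L : List Int) :
    ∀ (d : PySem.Dict Int (List Int)) (next : Int),
    d.keys.Nodup → (∀ i ∈ d.keys, i < next) → (∀ b ∈ d.values, b.length = 5) →
    (L.foldl (fun st _ => solveStep n st) (d, next)).1.values
      = L.foldl (fun bs _ => stepB n bs) d.values := by
  induction L with
  | nil => intro d next _ _ _; rfl
  | cons x t ih =>
      intro d next hnd hlt h5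
      simp only [List.foldl_cons]
      obtain ⟨hv, hn2, hb2⟩ := step_main n d next hnd hlt h5
      have h52 : ∀ b ∈ (solveStep n (d, next)).1.values, b.length = 5 := by
        rw [hv]; exact stepB_len5 n d.values h5
      have hrec := ih (solveStep n (d, next)).1 (solveStep n (d, next)).2 hn2 hb2 h52
      rw [← hv]
      exact hrec

theorem init_items (fireballs : List (List Int)) :
    (PySem.Dict.ofList (PySem.List.enumerate fireballs)).items
      = PySem.List.enumerate fireballs := by
  show (List.foldl (fun acc p => acc.insert p.1 p.2) PySem.Dict.empty (PySem.List.enumerate fireballs)).items = _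
  rw [PySem.Dict.items_foldl_insert_fresh (PySem.List.enumerate fireballs) (fun p => p.1) (fun p => p.2)]
  · rw [show (PySem.Dict.empty : PySem.Dict Int (List Int)).items = [] from rfl]
    simp
  · intro a _; simp
  · rw [PySem.List.map_fst_enumerate]
    unfold PySem.List.pyRange
    simp only [if_neg (by norm_num : ¬ (1:Int) = 0)]
    apply List.Nodup.map
    · intro a b hab; simpa using hab
    · exact List.nodup_range

-- ---------- the partition-refinement side: canonical form per distinct cell ----------

-- the balls one landing cell contributes to the next round
def contrib (c : Int × Int) (g : List (List Int)) : List (List Int) :=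
  if g.length == 1 then g else splitOutB c g

-- the next round, written as a flatMap over a list of distinct cells
def canonOn (cs : List (Int × Int)) (m : List (List Int)) : List (List Int) :=
  cs.flatMap (fun c => contrib c (m.filter (fun x => cellOf x == c)))

theorem contrib_nil (c : Int × Int) : contrib c [] = [] := by
  simp [contrib, splitOutB]

theorem chop_cons (b : List Int) (rest : List (List Int)) :
    chop (b :: rest)
      = (if ((b :: rest).filter (fun x => cellOf x == cellOf b)).length == 1 then
           (b :: rest).filter (fun x => cellOf x == cellOf b)
         else
           let grp := (b :: rest).filter (fun x => cellOf x == cellOf b)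
           let nm := PySem.Int.floordiv ((grp.map (fun x => PySem.List.pyGetD x 2 0)).sum) 5
           if nm ≠ 0 then
             let ns := PySem.Int.floordiv ((grp.map (fun x => PySem.List.pyGetD x 3 0)).sum) (grp.length : Int)
             if grp.all (fun x => PySem.Int.mod (PySem.List.pyGetD x 4 0) 2
                   == PySem.Int.mod (PySem.List.pyGetD (PySem.List.pyGetD grp 0 []) 4 0) 2) then
               (PySem.List.pyRange 0 8 2).map (fun nd => [(cellOf b).1, (cellOf b).2, nm, ns, nd])
             else
               (PySem.List.pyRange 1 8 2).map (fun nd => [(cellOf b).1, (cellOf b).2, nm, ns, nd])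
           else [])
        ++ chop ((b :: rest).filter (fun x => cellOf x != cellOf b)) := by
  rw [chop.eq_def]

-- 'all elements equal the head' ↔ 'the set of elements is a singleton'
theorem all_eq_head_iff (x : Int) (t : List Int) :
    ((x :: t).all (fun y => y == x)) = ((PySem.Set.ofList (x :: t)).length == 1) := by
  rw [PySem.Set.ofList_cons]
  by_cases h : ∀ y ∈ t, y = x
  · have hd : PySem.Set.discard (PySem.Set.ofList t) x = [] := by
      rw [List.eq_nil_iff_forall_not_mem]
      intro y hy
      have hm := (PySem.Set.mem_discard (PySem.Set.ofList t) x y).mp hy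
      exact hm.2 (h y ((PySem.Set.mem_ofList t y).mp hm.1))
    have hall : ((x :: t).all (fun y => y == x)) = true := by
      rw [List.all_eq_true]
      intro y hy
      rcases List.mem_cons.mp hy with rfl | hy'
      · simp
      · simp [h y hy']
    rw [hall, hd]
    rfl
  · obtain ⟨y, hy, hne⟩ : ∃ y ∈ t, y ≠ x := by
      by_contra hno
      push_neg at hno
      exact h hno
    have hd : y ∈ PySem.Set.discard (PySem.Set.ofList t) x :=
      (PySem.Set.mem_discard (PySem.Set.ofList t) x y).mpr ⟨(PySem.Set.mem_ofList t y).mpr hy, hne⟩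
    have hlen := List.length_pos_of_mem hd
    have hall : (x :: t).all (fun y => y == x) = false := by
      rw [List.all_eq_false]
      exact ⟨y, List.mem_cons_of_mem x hy, by simpa using hne⟩
    rw [hall]
    symm
    simp only [List.length_cons, beq_eq_false_iff_ne, ne_eq]
    omega

-- splitting a list by distinct key values is a permutation of the list
theorem partition_perm : ∀ (cs : List (Int × Int)) (m : List (List Int)), cs.Nodup →
    (∀ x ∈ m, cellOf x ∈ cs) →
    (cs.flatMap (fun c => m.filter (fun x => cellOf x == c))).Perm m := by
  intro cs
  induction cs with
  | nil =>
      intro m _ hcov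
      have hm : m = [] := by
        rw [List.eq_nil_iff_forall_not_mem]
        intro x hx
        exact absurd (hcov x hx) (List.not_mem_nil)
      simp [hm]
  | cons c cs' ih =>
      intro m hnd hcov
      have hcn : c ∉ cs' := (List.nodup_cons.mp hnd).1
      have hstep : ∀ c' ∈ cs', (m.filter (fun x => !(cellOf x == c))).filter (fun x => cellOf x == c')
            = m.filter (fun x => cellOf x == c') := by
        intro c' hc'
        rw [List.filter_filter]
        apply List.filter_congr
        intro x _
        by_cases hx : cellOf x = c'
        · have hcc : ¬ c' = c := fun hq => hcn (hq ▸ hc')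
          simp [hx, hcc]
        · simp [hx]
      have hcov' : ∀ x ∈ m.filter (fun x => !(cellOf x == c)), cellOf x ∈ cs' := by
        intro x hx
        have h1 := hcov x (List.mem_of_mem_filter hx)
        have h2 := List.of_mem_filter hx
        simp only [Bool.not_eq_eq_eq_not, Bool.not_true, beq_eq_false_iff_ne, ne_eq] at h2
        rcases List.mem_cons.mp h1 with h | h
        · exact absurd h h2
        · exact h
      have ihp := ih (m.filter (fun x => !(cellOf x == c))) (List.nodup_cons.mp hnd).2 hcov'
      rw [List.flatMap_cons]
      have htail : cs'.flatMap (fun c' => m.filter (fun x => cellOf x == c'))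
          = cs'.flatMap (fun c' => (m.filter (fun x => !(cellOf x == c))).filter (fun x => cellOf x == c')) := by
        refine List.flatMap_congr ?_
        intro a ha
        rw [hstep a ha]
      rw [htail]
      exact ((ihp.append_left (m.filter (fun x => cellOf x == c)))).trans
        (List.filter_append_perm (fun x => cellOf x == c) m)

theorem flatMap_append_perm {α β : Type} (cs : List α) (f g : α → List β) :
    (cs.flatMap (fun c => f c ++ g c)).Perm (cs.flatMap f ++ cs.flatMap g) := by
  induction cs with
  | nil => simp
  | cons c cs' ih =>
      simp only [List.flatMap_cons]
      refine (ih.append_left (f c ++ g c)).trans ?_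
      have h1 : (g c ++ (cs'.flatMap f ++ cs'.flatMap g)).Perm
          (cs'.flatMap f ++ (g c ++ cs'.flatMap g)) := by
        rw [← List.append_assoc, ← List.append_assoc]
        exact (List.perm_append_comm).append_right _
      calc ((f c ++ g c) ++ (cs'.flatMap f ++ cs'.flatMap g)).Perm
            (f c ++ (cs'.flatMap f ++ (g c ++ cs'.flatMap g))) := by
              rw [List.append_assoc]
              exact h1.append_left _
        _ = (f c ++ cs'.flatMap f) ++ (g c ++ cs'.flatMap g) := by
              rw [List.append_assoc]

-- the hash-grouped step is a permutation of the canonical per-cell flatMap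
theorem stepB_canon (n : Int) (l : List (List Int)) (h5 : ∀ b ∈ l, b.length = 5) :
    (stepB n l).Perm
      (canonOn (PySem.Set.ofList ((l.map (moveB n)).map cellOf)) (l.map (moveB n))) := by
  have hmg := phase1B n l [] PySem.Dict.empty h5
  have hcellkeq : l.map (cellK n) = (l.map (moveB n)).map cellOf := by
    rw [List.map_map]; rfl
  have hgrpeq : ∀ c, (l.filter (fun x => cellK n x == c)).map (moveB n)
      = (l.map (moveB n)).filter (fun x => cellOf x == c) := by
    intro c
    rw [List.filter_map]
    rfl
  have hboard : ∀ c, (l.foldl (stepB_move n) ([], PySem.Dict.empty)).2.getD c []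
      = (l.map (moveB n)).filter (fun x => cellOf x == c) := by
    intro c
    rw [hmg]
    show (l.foldl (fun bd b => bd.modify (cellK n b) [] (· ++ [moveB n b])) PySem.Dict.empty).getD c [] = _
    rw [board_getD (cellK n) (moveB n) l c, hgrpeq]
  have hitems : (l.foldl (stepB_move n) ([], PySem.Dict.empty)).2.items
      = (PySem.Set.ofList ((l.map (moveB n)).map cellOf)).map
          (fun c => (c, (l.map (moveB n)).filter (fun x => cellOf x == c))) := by
    rw [hmg]
    show (l.foldl (fun bd b => bd.modify (cellK n b) [] (· ++ [moveB n b])) PySem.Dict.empty).items = _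
    rw [board_items (cellK n) (moveB n) l, hcellkeq]
    exact List.map_congr_left (fun c _ => by rw [hgrpeq])
  set m := l.map (moveB n) with hm
  set C := PySem.Set.ofList (m.map cellOf) with hC
  set p : List Int → Bool := fun b => ((m.filter (fun x => cellOf x == cellOf b)).length == 1) with hp
  have hfirst : (l.foldl (stepB_move n) ([], PySem.Dict.empty)).1 = m := by
    rw [hmg]; simp [hm]
  have hstepB : stepB n l = m.filter p ++ C.flatMap (fun c => splitOutB c (m.filter (fun x => cellOf x == c))) := by
    simp only [stepB]
    rw [hfirst, hitems, stepB_split_flatMap, List.flatMap_map]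
    congr 1
    apply List.filter_congr
    intro b _
    show (((l.foldl (stepB_move n) ([], PySem.Dict.empty)).2.getD (cellOf b) []).length == 1) = p b
    rw [hboard]
  rw [hstepB]
  have hcov : ∀ x ∈ m, cellOf x ∈ C := by
    intro x hx
    rw [hC, PySem.Set.mem_ofList]
    exact List.mem_map_of_mem hx
  have hfiltconst : ∀ c ∈ C, (m.filter (fun x => cellOf x == c)).filter p
      = if ((m.filter (fun x => cellOf x == c)).length == 1) then m.filter (fun x => cellOf x == c) else [] := by
    intro c _
    have hcongr : (m.filter (fun x => cellOf x == c)).filter p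
        = (m.filter (fun x => cellOf x == c)).filter
            (fun _ => ((m.filter (fun x => cellOf x == c)).length == 1)) := by
      apply List.filter_congr
      intro x hx
      have hcx : cellOf x = c := by simpa using List.of_mem_filter hx
      rw [hp]
      simp only [hcx]
    rw [hcongr]
    cases hlen : ((m.filter (fun x => cellOf x == c)).length == 1) <;> simp
  have hcontrib : ∀ c ∈ C, contrib c (m.filter (fun x => cellOf x == c))
      = (m.filter (fun x => cellOf x == c)).filter p
        ++ splitOutB c (m.filter (fun x => cellOf x == c)) := by
    intro c hc
    rw [hfiltconst c hc]
    unfold contrib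
    cases hq : ((m.filter (fun x => cellOf x == c)).length == 1)
    · simp
    · have h1 : (m.filter (fun x => cellOf x == c)).length = 1 := by simpa using hq
      have hsb : splitOutB c (m.filter (fun x => cellOf x == c)) = [] := by
        unfold splitOutB
        rw [if_neg (by omega)]
      simp [hsb]
  have hcanon : canonOn C m
      = C.flatMap (fun c => (m.filter (fun x => cellOf x == c)).filter p
          ++ splitOutB c (m.filter (fun x => cellOf x == c))) := by
    unfold canonOn
    exact List.flatMap_congr hcontrib
  have hsplit1 : (C.flatMap (fun c => (m.filter (fun x => cellOf x == c)).filter p)).Perm (m.filter p) := by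
    have h1 : C.flatMap (fun c => (m.filter (fun x => cellOf x == c)).filter p)
        = (C.flatMap (fun c => m.filter (fun x => cellOf x == c))).filter p := by
      rw [List.filter_flatMap]
    rw [h1]
    exact (partition_perm C m (PySem.Set.nodup_ofList _) hcov).filter p
  have := ((flatMap_append_perm C (fun c => (m.filter (fun x => cellOf x == c)).filter p)
      (fun c => splitOutB c (m.filter (fun x => cellOf x == c)))).trans
      (hsplit1.append_right _))
  rw [← hcanon] at this
  exact this.symm

-- B's partition loop computes the canonical per-cell flatMap (up to permutation),
-- for ANY nodup list of cells covering the landing cells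
theorem chop_canon : ∀ (N : Nat) (m : List (List Int)), m.length ≤ N →
    ∀ (cs : List (Int × Int)), cs.Nodup → (∀ x ∈ m, cellOf x ∈ cs) →
    (chop m).Perm (canonOn cs m) := by
  intro N
  induction N with
  | zero =>
      intro m hm cs _ _
      have : m = [] := List.eq_nil_of_length_eq_zero (Nat.le_zero.mp hm)
      subst this
      have h0 : canonOn cs [] = [] := by
        unfold canonOn
        rw [List.eq_nil_iff_forall_not_mem]
        intro x hx
        obtain ⟨c, _, hc⟩ := List.mem_flatMap.mp hx
        rw [List.filter_nil, contrib_nil] at hc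
        exact absurd hc (List.not_mem_nil)
      rw [h0, chop.eq_def]
  | succ N ih =>
      intro m hm cs hnd hcov
      match m with
      | [] =>
          have h0 : canonOn cs [] = [] := by
            unfold canonOn
            rw [List.eq_nil_iff_forall_not_mem]
            intro x hx
            obtain ⟨c, _, hc⟩ := List.mem_flatMap.mp hx
            rw [List.filter_nil, contrib_nil] at hc
            exact absurd hc (List.not_mem_nil)
          rw [h0, chop.eq_def]
      | b :: rest =>
          have hc0 : cellOf b ∈ cs := hcov b (List.mem_cons_self)
          set c0 := cellOf b with hc0def
          set grp := (b :: rest).filter (fun x => cellOf x == c0) with hgrp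
          set rest' := (b :: rest).filter (fun x => cellOf x != c0) with hrest'
          have hgrpcons : grp = b :: rest.filter (fun x => cellOf x == c0) := by
            rw [hgrp, List.filter_cons, if_pos (by simp [hc0def])]
          have hrestfil : rest' = rest.filter (fun x => cellOf x != c0) := by
            rw [hrest', List.filter_cons]
            simp [hc0def]
          -- chop's group branch is exactly 'contrib c0 grp'
          have hE : chop (b :: rest) = contrib c0 grp ++ chop rest' := by
            rw [chop_cons, ← hc0def, ← hgrp, ← hrest']
            unfold contrib
            congr 1
            cases hlen : (grp.length == 1)
            · simp only [Bool.false_eq_true, if_false]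
              have hgt : 1 < grp.length := by
                have h1 : grp.length ≠ 1 := by simpa using hlen
                have h2 : 0 < grp.length := by rw [hgrpcons]; simp
                omega
              unfold splitOutB
              rw [if_pos hgt]
              by_cases hnm : PySem.Int.floordiv ((grp.map (fun x => PySem.List.pyGetD x 2 0)).sum) 5 ≠ 0
              · rw [if_pos hnm, if_pos hnm]
                -- the parity conditions agree
                have hhead : PySem.List.pyGetD grp 0 [] = b := by
                  rw [hgrpcons]
                  simp [PySem.List.pyGetD_ofNat']
                have hpar : (grp.all (fun x => PySem.Int.mod (PySem.List.pyGetD x 4 0) 2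
                      == PySem.Int.mod (PySem.List.pyGetD (PySem.List.pyGetD grp 0 []) 4 0) 2))
                    = ((PySem.Set.ofList (grp.map (fun x => PySem.Int.mod (PySem.List.pyGetD x 4 0) 2))).length == 1) := by
                  rw [hhead]
                  have hmapall : (grp.all (fun x => PySem.Int.mod (PySem.List.pyGetD x 4 0) 2
                        == PySem.Int.mod (PySem.List.pyGetD b 4 0) 2))
                      = ((grp.map (fun x => PySem.Int.mod (PySem.List.pyGetD x 4 0) 2)).all
                          (fun y => y == PySem.Int.mod (PySem.List.pyGetD b 4 0) 2)) := by
                    rw [List.all_map]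
                    rfl
                  rw [hmapall]
                  have hmc : grp.map (fun x => PySem.Int.mod (PySem.List.pyGetD x 4 0) 2)
                      = PySem.Int.mod (PySem.List.pyGetD b 4 0) 2
                        :: (rest.filter (fun x => cellOf x == c0)).map (fun x => PySem.Int.mod (PySem.List.pyGetD x 4 0) 2) := by
                    rw [hgrpcons, List.map_cons]
                  rw [hmc]
                  exact all_eq_head_iff _ _
                rw [hpar]
                cases hcond : ((PySem.Set.ofList (grp.map (fun x => PySem.Int.mod (PySem.List.pyGetD x 4 0) 2))).length == 1)
                · simp only [Bool.false_eq_true, if_false]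
                · simp
              · rw [if_neg hnm, if_neg hnm]
            · simp
      -- now relate canonOn cs m to contrib c0 grp ++ canonOn (cs.erase c0) rest'
          have hcs : cs.Perm (c0 :: cs.erase c0) := List.perm_cons_erase hc0
          have hne0 : c0 ∉ cs.erase c0 := hnd.not_mem_erase
          have htail : ∀ c ∈ cs.erase c0,
              (b :: rest).filter (fun x => cellOf x == c) = rest'.filter (fun x => cellOf x == c) := by
            intro c hc
            have hcne : c ≠ c0 := by rintro rfl; exact hne0 hc
            rw [hrest', List.filter_filter]
            apply List.filter_congr
            intro x _
            by_cases hx : cellOf x = c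
            · simp [hx, hcne]
            · simp [hx]
          have hperm1 : (canonOn cs (b :: rest)).Perm (canonOn (c0 :: cs.erase c0) (b :: rest)) := by
            unfold canonOn
            exact List.Perm.flatMap hcs (fun a _ => List.Perm.refl _)
          have heq2 : canonOn (c0 :: cs.erase c0) (b :: rest)
              = contrib c0 grp ++ canonOn (cs.erase c0) rest' := by
            unfold canonOn
            rw [List.flatMap_cons, ← hgrp]
            congr 1
            refine List.flatMap_congr ?_
            intro c hc
            rw [htail c hc]
          -- induction hypothesis on rest'
          have hlenr : rest'.length ≤ N := by
            have h1 : (rest.filter (fun x => cellOf x != c0)).length ≤ rest.length :=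
              List.length_filter_le _ _
            have h2 : rest.length ≤ N := by
              have := hm
              simp only [List.length_cons] at this
              omega
            rw [hrestfil]
            omega
          have hcovr : ∀ x ∈ rest', cellOf x ∈ cs.erase c0 := by
            intro x hx
            have h1 : x ∈ b :: rest := List.mem_of_mem_filter hx
            have h2 := List.of_mem_filter hx
            have hne : cellOf x ≠ c0 := by simpa using h2
            exact (List.mem_erase_of_ne hne).mpr (hcov x h1)
          have hihr := ih rest' hlenr (cs.erase c0) (hnd.erase c0) hcovr
          rw [hE]
          refine ((hihr.append_left (contrib c0 grp)).trans ?_)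
          rw [← heq2]
          exact hperm1.symm

-- splitOutB only depends on the group through permutation-invariant data
theorem splitOutB_perm_eq (c : Int × Int) {g1 g2 : List (List Int)} (hp : g1.Perm g2) :
    splitOutB c g1 = splitOutB c g2 := by
  have hlen := hp.length_eq
  have hsum2 : (g1.map (fun b => PySem.List.pyGetD b 2 0)).sum
      = (g2.map (fun b => PySem.List.pyGetD b 2 0)).sum := (hp.map _).sum_eq
  have hsum3 : (g1.map (fun b => PySem.List.pyGetD b 3 0)).sum
      = (g2.map (fun b => PySem.List.pyGetD b 3 0)).sum := (hp.map _).sum_eq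
  have hsetlen : (PySem.Set.ofList (g1.map (fun b => PySem.Int.mod (PySem.List.pyGetD b 4 0) 2))).length
      = (PySem.Set.ofList (g2.map (fun b => PySem.Int.mod (PySem.List.pyGetD b 4 0) 2))).length := by
    have hsp : (PySem.Set.ofList (g1.map (fun b => PySem.Int.mod (PySem.List.pyGetD b 4 0) 2))).Perm
        (PySem.Set.ofList (g2.map (fun b => PySem.Int.mod (PySem.List.pyGetD b 4 0) 2))) := by
      rw [List.perm_ext_iff_of_nodup (PySem.Set.nodup_ofList _) (PySem.Set.nodup_ofList _)]
      intro a
      rw [PySem.Set.mem_ofList, PySem.Set.mem_ofList]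
      exact (hp.map _).mem_iff
    exact hsp.length_eq
  unfold splitOutB
  rw [hlen, hsum2, hsum3, hsetlen]

theorem contrib_perm (c : Int × Int) {g1 g2 : List (List Int)} (hp : g1.Perm g2) :
    (contrib c g1).Perm (contrib c g2) := by
  unfold contrib
  rw [hp.length_eq]
  cases hlen : (g2.length == 1)
  · rw [if_neg (by simp), if_neg (by simp), splitOutB_perm_eq c hp]
  · rw [if_pos rfl, if_pos rfl]
    exact hp

theorem canonOn_perm_m (cs : List (Int × Int)) {m1 m2 : List (List Int)} (hp : m1.Perm m2) :
    (canonOn cs m1).Perm (canonOn cs m2) := by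
  unfold canonOn
  exact List.Perm.flatMap (List.Perm.refl cs) (fun c _ => contrib_perm c (hp.filter _))

-- one whole step: hash-grouped helper vs B's partition loop
theorem step_perm (n : Int) (l1 l2 : List (List Int)) (h5 : ∀ b ∈ l1, b.length = 5)
    (hp : l1.Perm l2) : (stepB n l1).Perm (chop (l2.map (moveB n))) := by
  have hm : (l1.map (moveB n)).Perm (l2.map (moveB n)) := hp.map _
  have h1 := stepB_canon n l1 h5
  have h2 := canonOn_perm_m (PySem.Set.ofList ((l1.map (moveB n)).map cellOf)) hm
  have hcov : ∀ x ∈ l2.map (moveB n),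
      cellOf x ∈ PySem.Set.ofList ((l1.map (moveB n)).map cellOf) := by
    intro x hx
    rw [PySem.Set.mem_ofList]
    exact List.mem_map_of_mem (hm.mem_iff.mpr hx)
  have h3 := chop_canon (l2.map (moveB n)).length (l2.map (moveB n)) (le_refl _)
    (PySem.Set.ofList ((l1.map (moveB n)).map cellOf)) (PySem.Set.nodup_ofList _) hcov
  exact (h1.trans h2).trans h3.symm

theorem iter_perm (n : Int) : ∀ (L : List Int) (l1 l2 : List (List Int)),
    (∀ b ∈ l1, b.length = 5) → l1.Perm l2 →
    (L.foldl (fun bs _ => stepB n bs) l1).Perm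
      (L.foldl (fun bs _ => chop (bs.map (moveB n))) l2) := by
  intro L
  induction L with
  | nil => intro _ _ _ hp; exact hp
  | cons x t ih =>
      intro l1 l2 h5 hp
      simp only [List.foldl_cons]
      exact ih _ _ (stepB_len5 n l1 h5) (step_perm n l1 l2 h5 hp)

-- ===== VERDICT (by name: the statement is the Claim_ definition above) =====
theorem solve_spec : Claim_equal_solve := by
  intro n k fireballs _ hpre
  show solve n k fireballs = solve_alt n k fireballs
  have hv0 : (PySem.Dict.ofList (PySem.List.enumerate fireballs)).values = fireballs := by
    show (PySem.Dict.ofList (PySem.List.enumerate fireballs)).items.map (fun p => p.2) = _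
    rw [init_items]
    exact PySem.List.map_snd_enumerate fireballs 0
  have hk0 : (PySem.Dict.ofList (PySem.List.enumerate fireballs)).keys
      = PySem.List.pyRange 0 (fireballs.length : Int) := by
    show (PySem.Dict.ofList (PySem.List.enumerate fireballs)).items.map (fun p => p.1) = _
    rw [init_items]
    have := PySem.List.map_fst_enumerate fireballs 0
    simpa using this
  have hnd0 : (PySem.Dict.ofList (PySem.List.enumerate fireballs)).keys.Nodup := by
    rw [hk0]; exact nodup_pyRange _ _
  have hb0 : ∀ j ∈ (PySem.Dict.ofList (PySem.List.enumerate fireballs)).keys,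
      j < PySem.List.len fireballs := by
    intro j hj
    rw [hk0] at hj
    have := (PySem.List.mem_pyRange_one.mp hj).2
    simpa [PySem.List.len] using this
  by_cases hk : 1 ≤ k
  · have h5all : ∀ b ∈ fireballs, b.length = 5 := fun b hb => ((hpre.2 hk).2 b hb).1
    have hmain := loop_eq n (PySem.List.pyRange 0 k)
      (PySem.Dict.ofList (PySem.List.enumerate fireballs)) (PySem.List.len fireballs)
      hnd0 hb0 (by rw [hv0]; exact h5all)
    have hperm := iter_perm n (PySem.List.pyRange 0 k) fireballs fireballs h5all (List.Perm.refl _)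
    simp only [solve, solve_alt]
    rw [hmain, hv0]
    exact (hperm.map (fun b => PySem.List.pyGetD b 2 0)).sum_eq
  · have hnil : PySem.List.pyRange 0 k = [] := by
      unfold PySem.List.pyRange
      simp [show ¬ (0:Int) < k from by omega]
    simp only [solve, solve_alt, hnil, List.foldl_nil]
    rw [hv0]
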